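-- pv_equiv track=rewrite | github.com/jim-schilling/splurge-unittest-to-pytest | splurge_unittest_to_pytest/config_validation.py | _has_setup_methods
-- ===== SOURCE A (Python) =====
-- def _has_setup_methods(content: str) -> bool:
--     """Check if file has setup/teardown methods."""
--     setup_patterns = [
--         "def setUp",
--         "def tearDown",
--         "def setup_method",
--         "def teardown_method",
--         "def before_each",
--         "def after_each",
--         "def before_all",
--         "def after_all",
--     ]
--
--     return any(pattern in content for pattern in setup_patterns)
-- ===== SOURCE B (Python) =====
-- import re
--
-- _SETUP_RE = re.compile(
--     r"def (setUp|tearDown|setup_method|teardown_method|"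
--     r"before_each|after_each|before_all|after_all)"
-- )
--
--
-- def _has_setup_methods(content: str) -> bool:
--     """Check if file has setup/teardown methods."""
--     return bool(_SETUP_RE.search(content))
-- ===== Notes on version B (the rewrite author's own statement) =====
-- stated objective: idiomatic
-- what changed: Replaced the eight separate substring scans with one compiled regex that alternates the eight method-name literals after the shared method-definition prefix, so the text is traversed once by a single matcher.
import Mathlib
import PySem

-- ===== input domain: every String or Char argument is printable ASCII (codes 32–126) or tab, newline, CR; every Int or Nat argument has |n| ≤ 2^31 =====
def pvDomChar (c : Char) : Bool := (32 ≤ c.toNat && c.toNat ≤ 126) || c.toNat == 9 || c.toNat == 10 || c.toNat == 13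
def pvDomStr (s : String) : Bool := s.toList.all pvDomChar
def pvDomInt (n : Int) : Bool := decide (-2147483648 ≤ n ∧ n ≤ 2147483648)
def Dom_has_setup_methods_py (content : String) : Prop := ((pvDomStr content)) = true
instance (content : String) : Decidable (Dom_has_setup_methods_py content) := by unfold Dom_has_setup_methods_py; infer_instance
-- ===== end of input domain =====

-- B replaces A's eight separate substring scans with a single one-pass matcher
-- (compiled regex in Python; in the port: one scan over the text checking the shared
-- method-definition prefix then the eight alternatives) — objective: idiomatic.


-- ===== PORT A =====
def hsSetupPatterns : List String :=
  ["def setUp", "def tearDown", "def setup_method", "def teardown_method",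
   "def before_each", "def after_each", "def before_all", "def after_all"]

def has_setup_methods_py (content : String) : Bool :=
  hsSetupPatterns.any (fun pattern => PySem.Str.isIn pattern content)

-- ===== PORT B =====
-- B compiles the regex r"def (setUp|…|after_all)" and runs one search over content.
-- Ported by hand (PySem has no regex engine), exact for this alternation of plain
-- literals: the matcher tries each position left to right; at a position it matches
-- iff the prefix literal is there followed by one of the eight alternatives.
def hsRegexAlts : List (List Char) :=
  ["setUp".toList, "tearDown".toList, "setup_method".toList, "teardown_method".toList,
   "before_each".toList, "after_each".toList, "before_all".toList, "after_all".toList]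

def hsMatchAt (s : List Char) : Bool :=
  PySem.Chars.startswith s "def ".toList &&
    hsRegexAlts.any (fun alt => PySem.Chars.startswith (s.drop 4) alt)

def hsSearch : List Char → Bool
  | [] => hsMatchAt []
  | c :: rest => hsMatchAt (c :: rest) || hsSearch rest

def has_setup_methods_py_alt (content : String) : Bool :=
  hsSearch content.toList

-- ===== PRECONDITION & SPEC =====
def Spec_has_setup_methods_py (content : String) (out : Bool) : Prop := out = has_setup_methods_py_alt content
instance (content : String) (out : Bool) : Decidable (Spec_has_setup_methods_py content out) := by unfold Spec_has_setup_methods_py; infer_instance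

-- ===== CLAIM (what is proved, stated in full; the proofs are below) =====
def Claim_equal_has_setup_methods_py : Prop := ∀ (content : String), Dom_has_setup_methods_py content → Spec_has_setup_methods_py content (has_setup_methods_py content)

-- ===== LEMMAS AND PROOFS =====

/-- Splitting a prefix made of two concatenated literals. -/
theorem hs_prefix_append_iff (d a s : List Char) :
    (d ++ a) <+: s ↔ d <+: s ∧ a <+: s.drop d.length := by
  constructor
  · rintro ⟨t, rfl⟩
    refine ⟨⟨a ++ t, by simp⟩, ?_⟩
    simp
  · rintro ⟨hd, ha⟩
    obtain ⟨t, rfl⟩ := hd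
    obtain ⟨u, hu⟩ := ha
    simp at hu
    exact ⟨u, by simp [← hu]⟩

/-- A substring occurrence is a prefix at some dropped position. -/
theorem hs_infix_iff_drop (sub s : List Char) :
    sub <:+: s ↔ ∃ j, sub <+: s.drop j := by
  constructor
  · rintro ⟨pre, suf, h⟩
    exact ⟨pre.length, suf, by simp [← h]⟩
  · rintro ⟨j, t, ht⟩
    refine ⟨s.take j, t, ?_⟩
    have : s.take j ++ (sub ++ t) = s.take j ++ s.drop j := by rw [ht]
    simpa [List.append_assoc] using this

/-- The one-position matcher fires exactly when some full pattern is a prefix here. -/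
theorem hsMatchAt_iff (s : List Char) :
    hsMatchAt s = true ↔ ∃ alt ∈ hsRegexAlts, ("def ".toList ++ alt) <+: s := by
  simp only [hsMatchAt, Bool.and_eq_true, List.any_eq_true,
    PySem.Chars.startswith_iff]
  constructor
  · rintro ⟨hd, alt, hmem, ha⟩
    exact ⟨alt, hmem, (hs_prefix_append_iff _ _ _).2 ⟨hd, by simpa using ha⟩⟩
  · rintro ⟨alt, hmem, h⟩
    obtain ⟨hd, ha⟩ := (hs_prefix_append_iff _ _ _).1 h
    exact ⟨hd, alt, hmem, by simpa using ha⟩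

/-- The scan fires exactly when the matcher fires at some position. -/
theorem hsSearch_iff (s : List Char) :
    hsSearch s = true ↔ ∃ j, hsMatchAt (s.drop j) = true := by
  induction s with
  | nil => exact ⟨fun h => ⟨0, h⟩, fun ⟨j, h⟩ => by simpa using h⟩
  | cons c rest ih =>
    simp only [hsSearch, Bool.or_eq_true, ih]
    constructor
    · rintro (h | ⟨j, h⟩)
      · exact ⟨0, h⟩
      · exact ⟨j + 1, h⟩
    · rintro ⟨j, h⟩
      cases j with
      | zero => exact Or.inl h
      | succ j => exact Or.inr ⟨j, h⟩

/-- A's pattern list is the shared prefix concatenated with B's alternatives. -/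
theorem hsPatterns_eq :
    hsSetupPatterns = hsRegexAlts.map (fun alt => String.ofList ("def ".toList ++ alt)) := by
  rfl

/-- Swapping the position quantifier past the alternative quantifier. -/
theorem hs_exists_swap {α : Type} (l : List α) (P : α → Nat → Prop) :
    (∃ a ∈ l, ∃ j, P a j) ↔ ∃ j, ∃ a ∈ l, P a j := by
  constructor
  · rintro ⟨a, ha, j, h⟩; exact ⟨j, a, ha, h⟩
  · rintro ⟨j, a, ha, h⟩; exact ⟨a, ha, j, h⟩

-- ===== VERDICT (by name: the statement is the Claim_ definition above) =====
theorem has_setup_methods_py_spec : Claim_equal_has_setup_methods_py := by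
  intro content _
  show has_setup_methods_py content = has_setup_methods_py_alt content
  rw [Bool.eq_iff_iff]
  rw [show (has_setup_methods_py_alt content = true) ↔ _ from hsSearch_iff _]
  simp only [hsMatchAt_iff]
  rw [← hs_exists_swap]
  unfold has_setup_methods_py
  rw [hsPatterns_eq]
  simp only [List.any_eq_true, List.mem_map]
  constructor
  · rintro ⟨p, ⟨alt, hmem, rfl⟩, hin⟩
    refine ⟨alt, hmem, ?_⟩
    rw [← hs_infix_iff_drop]
    have := (PySem.Str.isIn_iff_infix _ _).1 hin
    simpa [String.toList_ofList] using this
  · rintro ⟨alt, hmem, h⟩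
    refine ⟨String.ofList ("def ".toList ++ alt), ⟨alt, hmem, rfl⟩, ?_⟩
    rw [PySem.Str.isIn_iff_infix]
    have := (hs_infix_iff_drop _ _).2 h
    simpa [String.toList_ofList] using this
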